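-- pv_equiv track=rewrite | github.com/ice-melt/python | NLP/nlp-7-3_chunk_tagger.py | tags_since_dt
-- ===== SOURCE A (Python) =====
-- def tags_since_dt(sentence, i):
--     tags = set()
--     for word, pos in sentence[:i]:
--         if pos == "DT":
--             tags = set()
--         else:
--             tags.add(pos)
--     return '+'.join(sorted(tags))
-- ===== SOURCE B (Python) =====
-- def tags_since_dt(sentence, i):
--     tags = set()
--     for word, pos in reversed(sentence[:i]):
--         if pos == "DT":
--             break
--         tags.add(pos)
--     return '+'.join(sorted(tags))
-- ===== Notes on version B (the rewrite author's own statement) =====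
-- stated objective: alternative
-- what changed: Replaces the forward pass that resets the tag set at every DT with a backward scan over the reversed prefix that collects tags and stops at the first DT seen from the end.
import Mathlib
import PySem

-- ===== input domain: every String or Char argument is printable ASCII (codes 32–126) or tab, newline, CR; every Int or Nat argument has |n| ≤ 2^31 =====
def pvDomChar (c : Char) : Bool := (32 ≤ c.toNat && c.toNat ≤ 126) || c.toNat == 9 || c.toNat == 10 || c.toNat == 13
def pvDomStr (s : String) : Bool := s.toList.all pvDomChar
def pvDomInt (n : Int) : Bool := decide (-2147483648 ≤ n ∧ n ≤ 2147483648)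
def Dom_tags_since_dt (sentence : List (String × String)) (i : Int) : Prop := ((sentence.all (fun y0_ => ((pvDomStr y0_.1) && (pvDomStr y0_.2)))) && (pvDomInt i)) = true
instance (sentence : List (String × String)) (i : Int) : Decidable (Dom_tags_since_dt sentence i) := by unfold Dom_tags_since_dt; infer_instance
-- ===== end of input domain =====

-- B replaces A's forward pass (reset the tag set at every "DT") by a backward scan over
-- the reversed prefix that collects tags and stops at the first "DT" seen from the end.


-- ===== PORT A =====
def tags_since_dt (sentence : List (String × String)) (i : Int) : String :=
  let tags : PySem.Set String :=
    (PySem.List.slice sentence none (some i)).foldl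
      (fun tags wp => if wp.2 == "DT" then PySem.Set.empty else PySem.Set.add tags wp.2)
      PySem.Set.empty
  PySem.Str.join "+" (PySem.List.sorted tags (fun x => x) false)

-- ===== PORT B =====
-- backward scan: collect each pos, stop at the first "DT" (B's 'break')
def collectBack : List (String × String) → PySem.Set String → PySem.Set String
  | [], tags => tags
  | (_, pos) :: rest, tags =>
      if pos == "DT" then tags else collectBack rest (PySem.Set.add tags pos)

def tags_since_dt_alt (sentence : List (String × String)) (i : Int) : String :=
  let tags : PySem.Set String :=
    collectBack (PySem.List.slice sentence none (some i)).reverse PySem.Set.empty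
  PySem.Str.join "+" (PySem.List.sorted tags (fun x => x) false)

-- ===== PRECONDITION & SPEC =====
def Spec_tags_since_dt (sentence : List (String × String)) (i : Int) (out : String) : Prop := out = tags_since_dt_alt sentence i
instance (sentence : List (String × String)) (i : Int) (out : String) : Decidable (Spec_tags_since_dt sentence i out) := by unfold Spec_tags_since_dt; infer_instance

-- ===== CLAIM (what is proved, stated in full; the proofs are below) =====
def Claim_equal_tags_since_dt : Prop := ∀ (sentence : List (String × String)) (i : Int), Dom_tags_since_dt sentence i → Spec_tags_since_dt sentence i (tags_since_dt sentence i)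

-- ===== LEMMAS AND PROOFS =====

-- A's loop body, named for the lemmas
def stepA (tags : PySem.Set String) (wp : String × String) : PySem.Set String :=
  if wp.2 == "DT" then PySem.Set.empty else PySem.Set.add tags wp.2

lemma nodup_foldl_stepA (l : List (String × String)) (s : PySem.Set String)
    (hs : s.Nodup) : (l.foldl stepA s).Nodup := by
  induction l generalizing s with
  | nil => exact hs
  | cons p rest ih =>
      simp only [List.foldl_cons]
      apply ih
      unfold stepA
      split
      · exact List.nodup_nil
      · exact PySem.Set.nodup_add s p.2 hs

lemma nodup_collectBack (l : List (String × String)) (s : PySem.Set String)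
    (hs : s.Nodup) : (collectBack l s).Nodup := by
  induction l generalizing s with
  | nil => exact hs
  | cons p rest ih =>
      obtain ⟨w, pos⟩ := p
      unfold collectBack
      split
      · exact hs
      · exact ih _ (PySem.Set.nodup_add s pos hs)

lemma mem_collectBack (l : List (String × String)) (s : PySem.Set String) (x : String) :
    x ∈ collectBack l s ↔ x ∈ s ∨ x ∈ (l.takeWhile (fun p => !(p.2 == "DT"))).map Prod.snd := by
  induction l generalizing s with
  | nil => simp [collectBack]
  | cons p rest ih =>
      obtain ⟨w, pos⟩ := p
      unfold collectBack
      by_cases h : pos = "DT"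
      · simp [h]
      · rw [if_neg (by simp [h]), List.takeWhile_cons_of_pos (by simp [h]), List.map_cons]
        simp only [ih, PySem.Set.mem_add, List.mem_cons]
        tauto

lemma mem_foldl_stepA (l : List (String × String)) (x : String) :
    x ∈ l.foldl stepA PySem.Set.empty ↔
      x ∈ (l.reverse.takeWhile (fun p => !(p.2 == "DT"))).map Prod.snd := by
  induction l using List.reverseRecOn with
  | nil => simp [PySem.Set.empty]
  | append_singleton l p ih =>
      rw [List.foldl_append]
      simp only [List.foldl_cons, List.foldl_nil, List.reverse_append, List.reverse_singleton,
        List.singleton_append, List.takeWhile_cons]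
      by_cases h : p.2 = "DT"
      · simp [stepA, h, PySem.Set.empty]
      · rw [if_pos (by simp [h]), List.map_cons]
        simp only [stepA, beq_iff_eq, if_neg h, PySem.Set.mem_add, List.mem_cons, ih]
        tauto

lemma sets_eq_as_lists (l : List (String × String)) :
    PySem.List.sorted (l.foldl stepA PySem.Set.empty) (fun x => x) false
      = PySem.List.sorted (collectBack l.reverse PySem.Set.empty) (fun x => x) false := by
  apply PySem.List.sorted_eq_sorted_of_perm
  · exact fun a b h => h
  · refine (List.perm_ext_iff_of_nodup ?_ ?_).mpr ?_
    · exact nodup_foldl_stepA l _ List.nodup_nil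
    · exact nodup_collectBack _ _ List.nodup_nil
    · intro x
      rw [mem_foldl_stepA, mem_collectBack]
      simp [PySem.Set.empty]

-- ===== VERDICT (by name: the statement is the Claim_ definition above) =====
theorem tags_since_dt_spec : Claim_equal_tags_since_dt := by
  intro sentence i _
  show tags_since_dt sentence i = tags_since_dt_alt sentence i
  unfold tags_since_dt tags_since_dt_alt
  exact congrArg (PySem.Str.join "+") (sets_eq_as_lists (PySem.List.slice sentence none (some i)))
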